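-- pv_equiv track=rewrite | github.com/Hik289/high-frequency-trading-system | 新建文件夹/backup/factor_search_min.py | get_night_min
-- ===== SOURCE A (Python) =====
-- def get_night_min(date: int):
--     min_lst = list()
--     min_lst += list(range(2101, 2160))
--     min_lst += list(range(2200, 2260))
--     min_lst += list(range(2300, 2360))
--     min_lst += list(range(0, 60))
--     min_lst += list(range(100, 160))
--     min_lst += list(range(200, 231))
--     res_lst = [elem + date * 10000 for elem in min_lst]
--     return res_lst
-- ===== SOURCE B (Python) =====
-- def get_night_min(date: int):
--     res = []
--     h, m = 21, 1
--     for _ in range(330):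
--         res.append(date * 10000 + h * 100 + m)
--         m += 1
--         if m == 60:
--             m = 0
--             h = (h + 1) % 24
--     return res
-- ===== Notes on version B (the rewrite author's own statement) =====
-- stated objective: simpler
-- what changed: Replaces the six concatenated range() lists plus a final add-offset comprehension with a single running-clock loop over (hour, minute) that emits each timestamp directly and wraps past midnight.
import Mathlib
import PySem

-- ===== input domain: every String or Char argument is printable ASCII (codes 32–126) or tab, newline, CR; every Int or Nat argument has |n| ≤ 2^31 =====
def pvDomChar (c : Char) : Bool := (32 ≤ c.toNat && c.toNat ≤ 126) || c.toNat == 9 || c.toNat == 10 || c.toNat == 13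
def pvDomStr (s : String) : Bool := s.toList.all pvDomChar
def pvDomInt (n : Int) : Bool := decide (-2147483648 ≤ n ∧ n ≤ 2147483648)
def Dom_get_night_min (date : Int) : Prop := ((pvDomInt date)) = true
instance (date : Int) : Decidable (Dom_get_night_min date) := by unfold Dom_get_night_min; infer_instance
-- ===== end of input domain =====

-- ===== PORT A =====
def get_night_min (date : Int) : List Int :=
  let min_lst : List Int := []
  let min_lst := min_lst ++ PySem.List.pyRange 2101 2160 1
  let min_lst := min_lst ++ PySem.List.pyRange 2200 2260 1
  let min_lst := min_lst ++ PySem.List.pyRange 2300 2360 1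
  let min_lst := min_lst ++ PySem.List.pyRange 0 60 1
  let min_lst := min_lst ++ PySem.List.pyRange 100 160 1
  let min_lst := min_lst ++ PySem.List.pyRange 200 231 1
  min_lst.map (fun elem => elem + date * 10000)

-- ===== PORT B =====
-- B-side: running clock; each iteration emits date*10000 + h*100 + m, then advances the clock.
def altLoop (date : Int) (h m : Int) : Nat → List Int
  | 0 => []
  | n + 1 =>
    (date * 10000 + h * 100 + m) ::
      (if m + 1 == 60 then altLoop date (PySem.Int.mod (h + 1) 24) 0 n
       else altLoop date h (m + 1) n)

def get_night_min_alt (date : Int) : List Int := altLoop date 21 1 330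

-- ===== PRECONDITION & SPEC =====
def Spec_get_night_min (date : Int) (out : List Int) : Prop := out = get_night_min_alt date
instance (date : Int) (out : List Int) : Decidable (Spec_get_night_min date out) := by unfold Spec_get_night_min; infer_instance

-- ===== CLAIM (what is proved, stated in full; the proofs are below) =====
def Claim_equal_get_night_min : Prop := ∀ (date : Int), Dom_get_night_min date → Spec_get_night_min date (get_night_min date)

-- ===== LEMMAS AND PROOFS =====

-- ===== VERDICT (by name: the statement is the Claim_ definition above) =====
theorem altLoop_shift (date h m : Int) (n : Nat) :
    altLoop date h m n = (altLoop 0 h m n).map (fun v => date * 10000 + v) := by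
  induction n generalizing h m with
  | zero => simp [altLoop]
  | succ n ih => simp only [altLoop]; split <;> simp [ih, add_assoc]

theorem get_night_min_spec : Claim_equal_get_night_min := by
  intro date _
  unfold Spec_get_night_min get_night_min get_night_min_alt
  rw [altLoop_shift]
  have hbase : altLoop 0 21 1 330 =
      ([] : List Int) ++ PySem.List.pyRange 2101 2160 1 ++ PySem.List.pyRange 2200 2260 1 ++
        PySem.List.pyRange 2300 2360 1 ++ PySem.List.pyRange 0 60 1 ++
        PySem.List.pyRange 100 160 1 ++ PySem.List.pyRange 200 231 1 := by set_option maxRecDepth 4000 in decide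
  rw [hbase]
  exact List.map_congr_left (fun x _ => by ring)
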